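-- pv_equiv track=rewrite | github.com/AndrewDeFever/Weather-and-Power-App | app/providers/oncor_kubra.py | _neighbors_tile_xy
-- ===== SOURCE A (Python) =====
-- from typing import Any, Dict, Iterable, List, Optional, Sequence, Tuple
--
-- def _neighbors_tile_xy(tx: int, ty: int, zoom: int, depth: int) -> List[Tuple[int, int]]:
--     if depth <= 0:
--         return [(tx, ty)]
--     n = 1 << zoom
--     out: List[Tuple[int, int]] = []
--     for dy in range(-depth, depth + 1):
--         for dx in range(-depth, depth + 1):
--             nx, ny = tx + dx, ty + dy
--             if 0 <= nx < n and 0 <= ny < n: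
--                 out.append((nx, ny))
--     return out
-- ===== SOURCE B (Python) =====
-- def _neighbors_tile_xy(tx: int, ty: int, zoom: int, depth: int):
--     # Single flat pass: compute the clamped valid rectangle, then decode each
--     # linear index k into (x, y) with divmod instead of nested loops.
--     if depth <= 0:
--         return [(tx, ty)]
--     n = 1 << zoom
--     x0, x1 = max(0, tx - depth), min(n - 1, tx + depth)
--     y0, y1 = max(0, ty - depth), min(n - 1, ty + depth)
--     w, h = x1 - x0 + 1, y1 - y0 + 1
--     if w <= 0 or h <= 0:
--         return []
--     return [(x0 + k % w, y0 + k // w) for k in range(w * h)]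
-- ===== Notes on version B (the rewrite author's own statement) =====
-- stated objective: alternative
-- what changed: B replaces A's nested scan over the whole (2*depth+1)^2 offset window with per-cell bounds filtering by one flat loop over linear indices of the analytically clamped valid rectangle, decoding each index k to coordinates with divmod (x = x0 + k % w, y = y0 + k // w).
import Mathlib
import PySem

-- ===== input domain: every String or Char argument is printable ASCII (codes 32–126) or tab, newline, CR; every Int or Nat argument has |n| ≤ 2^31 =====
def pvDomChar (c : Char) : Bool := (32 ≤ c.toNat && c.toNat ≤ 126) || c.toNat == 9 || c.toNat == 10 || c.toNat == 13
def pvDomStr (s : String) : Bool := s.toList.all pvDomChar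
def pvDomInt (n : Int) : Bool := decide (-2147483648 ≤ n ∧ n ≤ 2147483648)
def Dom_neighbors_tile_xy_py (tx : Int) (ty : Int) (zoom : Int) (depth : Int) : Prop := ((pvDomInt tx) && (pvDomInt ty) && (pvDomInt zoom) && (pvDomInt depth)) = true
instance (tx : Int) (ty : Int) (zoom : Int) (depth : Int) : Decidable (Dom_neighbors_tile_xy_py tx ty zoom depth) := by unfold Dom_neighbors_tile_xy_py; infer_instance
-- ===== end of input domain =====

-- B replaces A's nested scan-and-filter over the offset window by one flat loop over
-- linear indices of the clamped valid rectangle, decoding each index with divmod (alternative decomposition).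

-- ===== PORT A =====
def neighbors_tile_xy_py (tx : Int) (ty : Int) (zoom : Int) (depth : Int) : List (Int × Int) :=
  if depth ≤ 0 then [(tx, ty)]
  else
    -- n = 1 << zoom; exact for zoom ≥ 0 (guaranteed by Pre_; Python raises ValueError otherwise)
    let n : Int := 2 ^ zoom.toNat
    (PySem.List.pyRange (-depth) (depth + 1) 1).foldl (fun out dy =>
      (PySem.List.pyRange (-depth) (depth + 1) 1).foldl (fun out dx =>
        if 0 ≤ tx + dx ∧ tx + dx < n ∧ 0 ≤ ty + dy ∧ ty + dy < n then
          out ++ [(tx + dx, ty + dy)]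
        else out) out) []

-- ===== PORT B =====
def neighbors_tile_xy_py_alt (tx : Int) (ty : Int) (zoom : Int) (depth : Int) : List (Int × Int) :=
  if depth ≤ 0 then [(tx, ty)]
  else
    -- n = 1 << zoom; exact for zoom ≥ 0 (guaranteed by Pre_; Python raises ValueError otherwise)
    let n : Int := 2 ^ zoom.toNat
    let x0 : Int := max 0 (tx - depth)
    let x1 : Int := min (n - 1) (tx + depth)
    let y0 : Int := max 0 (ty - depth)
    let y1 : Int := min (n - 1) (ty + depth)
    let w : Int := x1 - x0 + 1
    let h : Int := y1 - y0 + 1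
    if w ≤ 0 ∨ h ≤ 0 then []
    else (PySem.List.pyRange 0 (w * h) 1).map
      (fun k => (x0 + PySem.Int.mod k w, y0 + PySem.Int.floordiv k w))

-- ===== PRECONDITION & SPEC =====
-- Pre_ excludes depth > 0 with zoom < 0, where Python's `1 << zoom` raises ValueError in both A and B.
def Pre_neighbors_tile_xy_py (tx : Int) (ty : Int) (zoom : Int) (depth : Int) : Prop :=
  depth ≤ 0 ∨ 0 ≤ zoom
instance (tx : Int) (ty : Int) (zoom : Int) (depth : Int) : Decidable (Pre_neighbors_tile_xy_py tx ty zoom depth) := by unfold Pre_neighbors_tile_xy_py; infer_instance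

def pvWitness_neighbors_tile_xy_py : Int × Int × Int × Int := (1, 1, 2, 1)

def Spec_neighbors_tile_xy_py (tx : Int) (ty : Int) (zoom : Int) (depth : Int) (out : List (Int × Int)) : Prop := out = neighbors_tile_xy_py_alt tx ty zoom depth
instance (tx : Int) (ty : Int) (zoom : Int) (depth : Int) (out : List (Int × Int)) : Decidable (Spec_neighbors_tile_xy_py tx ty zoom depth out) := by unfold Spec_neighbors_tile_xy_py; infer_instance

-- ===== CLAIM (what is proved, stated in full; the proofs are below) =====
def Claim_equal_neighbors_tile_xy_py : Prop := ∀ (tx : Int) (ty : Int) (zoom : Int) (depth : Int), Dom_neighbors_tile_xy_py tx ty zoom depth → Pre_neighbors_tile_xy_py tx ty zoom depth → Spec_neighbors_tile_xy_py tx ty zoom depth (neighbors_tile_xy_py tx ty zoom depth)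

-- ===== LEMMAS AND PROOFS =====

-- Filtering an integer range by a shifted interval test yields the clamped sub-range.
theorem pv_filter_pyRange (t lo hi : Int) : ∀ (m : Nat) (a b : Int), (b - a).toNat ≤ m →
    (PySem.List.pyRange a b 1).filter (fun x => decide (lo ≤ t + x ∧ t + x < hi)) =
      PySem.List.pyRange (max a (lo - t)) (min b (hi - t)) 1 := by
  intro m
  induction m with
  | zero =>
    intro a b h
    rw [PySem.List.pyRange_one_eq_nil (by omega), PySem.List.pyRange_one_eq_nil (by omega)]
    rfl
  | succ m ih =>
    intro a b h
    by_cases hab : b ≤ a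
    · rw [PySem.List.pyRange_one_eq_nil hab, PySem.List.pyRange_one_eq_nil (by omega)]
      rfl
    · rw [PySem.List.pyRange_one_cons (by omega), List.filter_cons]
      by_cases hc : lo ≤ t + a ∧ t + a < hi
      · rw [if_pos (by simpa using hc), ih (a + 1) b (by omega)]
        rw [show max (a + 1) (lo - t) = a + 1 by omega]
        rw [PySem.List.pyRange_one_cons (show max a (lo - t) < min b (hi - t) by omega)]
        rw [show max a (lo - t) = a by omega]
      · rw [if_neg (by simpa using hc), ih (a + 1) b (by omega)]
        by_cases hhi : hi ≤ t + a
        · rw [PySem.List.pyRange_one_eq_nil (by omega), PySem.List.pyRange_one_eq_nil (by omega)]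
        · congr 1
          omega

-- range(t+a, t+b) is the t-shift of range(a, b)
theorem pv_pyRange_shift (t a b : Int) :
    PySem.List.pyRange (t + a) (t + b) 1 = (PySem.List.pyRange a b 1).map (fun x => t + x) := by
  rw [PySem.List.pyRange_one, PySem.List.pyRange_one, List.map_map]
  rw [show t + b - (t + a) = b - a by ring]
  apply List.map_congr_left
  intro k _
  simp
  ring

-- flatMap of a guarded function = flatMap over the filtered list
theorem pv_flatMap_ite {α β : Type} (l : List α) (q : α → Bool) (h : α → List β) :
    l.flatMap (fun y => if q y then h y else []) = (l.filter q).flatMap h := by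
  induction l with
  | nil => rfl
  | cons x xs ih =>
    by_cases hx : q x = true
    · simp [hx, ih]
    · simp only [Bool.not_eq_true] at hx
      simp [hx, ih]

-- the filtered-and-mapped inner row of A, for one fixed dy
theorem pv_inner_row (tx ty n d dy : Int) :
    ((PySem.List.pyRange (-d) (d + 1) 1).filter
        (fun dx => decide (0 ≤ tx + dx ∧ tx + dx < n ∧ 0 ≤ ty + dy ∧ ty + dy < n))).map
        (fun dx => (tx + dx, ty + dy)) =
      if decide (0 ≤ ty + dy ∧ ty + dy < n) then
        ((PySem.List.pyRange (max (-d) (0 - tx)) (min (d + 1) (n - tx)) 1).map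
          (fun dx => (tx + dx, ty + dy)))
      else [] := by
  by_cases hq : 0 ≤ ty + dy ∧ ty + dy < n
  · rw [if_pos (by simpa using hq)]
    congr 1
    rw [← pv_filter_pyRange tx 0 n ((d + 1) - (-d)).toNat (-d) (d + 1) le_rfl]
    apply List.filter_congr
    intro dx _
    simp [hq.1, hq.2]
  · rw [if_neg (by simpa using hq)]
    rw [List.filter_eq_nil_iff.mpr ?_]
    · rfl
    · intro dx _
      simp
      intro _ _ h
      omega

-- a w×h rectangle enumerated row by row equals the divmod decoding of its linear indices
theorem pv_linear_aux (x0 y0 w : Int) (hw : 0 < w) : ∀ (h : Nat),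
    (PySem.List.pyRange y0 (y0 + h) 1).flatMap
        (fun ny => (PySem.List.pyRange x0 (x0 + w) 1).map (fun nx => (nx, ny))) =
      (PySem.List.pyRange 0 (w * h) 1).map
        (fun k => (x0 + PySem.Int.mod k w, y0 + PySem.Int.floordiv k w)) := by
  intro h
  induction h with
  | zero => simp [PySem.List.pyRange_one_eq_nil]
  | succ h ih =>
    have hc : ((h + 1 : Nat) : Int) = (h : Int) + 1 := by push_cast; ring
    rw [hc, show y0 + ((h : Int) + 1) = (y0 + h) + 1 by ring,
        PySem.List.pyRange_one_succ_right (by omega), List.flatMap_append, ih,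
        show w * ((h : Int) + 1) = w * h + w by ring,
        PySem.List.pyRange_one_append 0 (w * h) (w * h + w) (by positivity) (by omega),
        List.map_append]
    congr 1
    simp only [List.flatMap_cons, List.flatMap_nil, List.append_nil]
    rw [PySem.List.pyRange_one x0 (x0 + w), PySem.List.pyRange_one (w * (h : Int)) (w * (h : Int) + w),
        show x0 + w - x0 = w by ring, show w * (h : Int) + w - w * (h : Int) = w by ring,
        List.map_map, List.map_map]
    apply List.map_congr_left
    intro k hk
    rw [List.mem_range] at hk
    have hk0 : (0 : Int) ≤ (k : Int) := by positivity
    have hkw : (k : Int) < w := by omega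
    have hmod : PySem.Int.mod (w * (h : Int) + k) w = k := by
      rw [PySem.Int.mod_eq_emod_of_pos hw, show w * (h : Int) + k = (k : Int) + w * h by ring,
          Int.add_mul_emod_self_left, Int.emod_eq_of_lt hk0 hkw]
    have hdiv : PySem.Int.floordiv (w * (h : Int) + k) w = h := by
      rw [PySem.Int.floordiv_eq_ediv_of_pos hw, show w * (h : Int) + k = (k : Int) + w * h by ring,
          Int.add_mul_ediv_left _ _ (by omega), Int.ediv_eq_zero_of_lt hk0 hkw]
      ring
    simp [Function.comp, hmod, hdiv]

-- ===== VERDICT (by name: the statement is the Claim_ definition above) =====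
theorem neighbors_tile_xy_py_spec : Claim_equal_neighbors_tile_xy_py := by
  intro tx ty zoom depth _ hpre
  unfold Spec_neighbors_tile_xy_py neighbors_tile_xy_py neighbors_tile_xy_py_alt
  by_cases hd : depth ≤ 0
  · simp [hd]
  · simp only [if_neg hd]
    set n : Int := 2 ^ zoom.toNat with hn
    have hn1 : 1 ≤ n := by exact one_le_pow₀ (by norm_num)
    simp only [PySem.List.foldl_append_singleton_eq_map, PySem.List.foldl_append_ite,
      PySem.List.foldl_append_eq_flatMap, List.nil_append]
    -- rewrite A's side into a flatMap over the clamped dy-range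
    have hA :
        (PySem.List.pyRange (-depth) (depth + 1) 1).flatMap
          (fun dy =>
            ((PySem.List.pyRange (-depth) (depth + 1) 1).filter
                (fun dx => decide (0 ≤ tx + dx ∧ tx + dx < n ∧ 0 ≤ ty + dy ∧ ty + dy < n))).map
              (fun dx => (tx + dx, ty + dy))) =
        (PySem.List.pyRange (max (-depth) (0 - ty)) (min (depth + 1) (n - ty)) 1).flatMap
          (fun dy =>
            (PySem.List.pyRange (max (-depth) (0 - tx)) (min (depth + 1) (n - tx)) 1).map
              (fun dx => (tx + dx, ty + dy))) := by
      calc (PySem.List.pyRange (-depth) (depth + 1) 1).flatMap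
            (fun dy =>
              ((PySem.List.pyRange (-depth) (depth + 1) 1).filter
                  (fun dx => decide (0 ≤ tx + dx ∧ tx + dx < n ∧ 0 ≤ ty + dy ∧ ty + dy < n))).map
                (fun dx => (tx + dx, ty + dy)))
          = (PySem.List.pyRange (-depth) (depth + 1) 1).flatMap
              (fun dy =>
                if decide (0 ≤ ty + dy ∧ ty + dy < n) then
                  ((PySem.List.pyRange (max (-depth) (0 - tx)) (min (depth + 1) (n - tx)) 1).map
                    (fun dx => (tx + dx, ty + dy)))
                else []) := by
            apply List.flatMap_congr
            intro dy _
            exact pv_inner_row tx ty n depth dy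
        _ = _ := by
            rw [pv_flatMap_ite]
            rw [pv_filter_pyRange ty 0 n ((depth + 1) - (-depth)).toNat (-depth) (depth + 1) le_rfl]
    rw [hA]
    set x0 : Int := max 0 (tx - depth) with hx0
    set y0 : Int := max 0 (ty - depth) with hy0
    set x1 : Int := min (n - 1) (tx + depth) with hx1
    set y1 : Int := min (n - 1) (ty + depth) with hy1
    -- the clamped offset ranges are shifts of the clamped coordinate ranges
    have hy : PySem.List.pyRange (max (-depth) (0 - ty)) (min (depth + 1) (n - ty)) 1
        = (PySem.List.pyRange y0 (y1 + 1) 1).map (fun v => -ty + v) := by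
      rw [← pv_pyRange_shift (-ty) y0 (y1 + 1)]
      congr 1 <;> omega
    have hx : PySem.List.pyRange (max (-depth) (0 - tx)) (min (depth + 1) (n - tx)) 1
        = (PySem.List.pyRange x0 (x1 + 1) 1).map (fun v => -tx + v) := by
      rw [← pv_pyRange_shift (-tx) x0 (x1 + 1)]
      congr 1 <;> omega
    rw [hy, hx, List.flatMap_map]
    -- the clean rectangle equals B's linear-index enumeration
    have hclean : (PySem.List.pyRange y0 (y1 + 1) 1).flatMap
        (fun ny => (PySem.List.pyRange x0 (x1 + 1) 1).map (fun nx => (nx, ny)))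
      = (if x1 - x0 + 1 ≤ 0 ∨ y1 - y0 + 1 ≤ 0 then ([] : List (Int × Int)) else
          (PySem.List.pyRange 0 ((x1 - x0 + 1) * (y1 - y0 + 1)) 1).map
            (fun k => (x0 + PySem.Int.mod k (x1 - x0 + 1),
                       y0 + PySem.Int.floordiv k (x1 - x0 + 1)))) := by
      by_cases hwh : x1 - x0 + 1 ≤ 0 ∨ y1 - y0 + 1 ≤ 0
      · rw [if_pos hwh]
        rcases hwh with hwle | hhle
        · have hxe : PySem.List.pyRange x0 (x1 + 1) 1 = [] :=
            PySem.List.pyRange_one_eq_nil (by omega)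
          simp [hxe]
        · have hye : PySem.List.pyRange y0 (y1 + 1) 1 = [] :=
            PySem.List.pyRange_one_eq_nil (by omega)
          simp [hye]
      · rw [if_neg hwh]
        push_neg at hwh
        have hcast : (((y1 - y0 + 1).toNat : Nat) : Int) = y1 - y0 + 1 := by omega
        have hlin := pv_linear_aux x0 y0 (x1 - x0 + 1) (by omega) (y1 - y0 + 1).toNat
        rw [hcast, show y0 + (y1 - y0 + 1) = y1 + 1 by ring,
            show x0 + (x1 - x0 + 1) = x1 + 1 by ring] at hlin
        exact hlin
    refine Eq.trans ?_ hclean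
    apply List.flatMap_congr
    intro v _
    simp only [Function.comp_def, List.map_map]
    apply List.map_congr_left
    intro x _
    simp only [Function.comp_def, Prod.mk.injEq]
    omega
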